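-- pv_equiv track=rewrite | github.com/AlexTuisov/HW2 | HW2_submission/79_submission/ex2.py | create_atoms
-- ===== SOURCE A (Python) =====
-- def create_atoms(num_of_turns, num_of_rows, num_of_cols):
--     atoms_list = list()
--     at_most_one = list()
--     for turn in range(num_of_turns):
--         for row in range(num_of_rows):
--             for col in range(num_of_cols):
--                 healthy = int(str(1) + str(row) + str(col) + str(turn))
--                 sick = int(str(2) + str(row) + str(col) + str(turn))
--                 unpopulated = int(str(3) + str(row) + str(col) + str(turn))
--                 quarantined = int(str(4) + str(row) + str(col) + str(turn))
--                 vaccinated = int(str(5) + str(row) + str(col) + str(turn))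
--                 at_least_one = [healthy, sick, unpopulated, quarantined, vaccinated]
--                 atoms_list.append(at_least_one)
--                 for status_num, status in enumerate(at_least_one):
--                     for i in range(status_num + 1, len(at_least_one)):
--                         at_most_one.append([-status, -at_least_one[i]])
--     atoms_list += at_most_one
--     return atoms_list
-- ===== SOURCE B (Python) =====
-- def _pairs(group):
--     if not group:
--         return []
--     x, rest = group[0], group[1:]
--     return [[-x, -y] for y in rest] + _pairs(rest)
--
--
-- def create_atoms(num_of_turns, num_of_rows, num_of_cols):
--     # First pass: build only the per-cell atom groups.
--     atoms_list = []
--     for turn in range(num_of_turns):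
--         for row in range(num_of_rows):
--             for col in range(num_of_cols):
--                 atoms_list.append([int(str(s) + str(row) + str(col) + str(turn))
--                                    for s in range(1, 6)])
--     # Second pass: rescan the table, generating all i<j pair clauses per group.
--     at_most_one = []
--     for group in atoms_list:
--         at_most_one += _pairs(group)
--     return atoms_list + at_most_one
-- ===== Notes on version B (the rewrite author's own statement) =====
-- stated objective: alternative
-- what changed: Replaces the single fused triple loop (which interleaves group building with an enumerate+index inner pair loop) with a build-table-then-rescan decomposition: a first pass builds the atom groups via a range(1,6) comprehension, then a second pass over that table emits the i<j pair clauses via a recursive head/tail combinations helper.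
import Mathlib
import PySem

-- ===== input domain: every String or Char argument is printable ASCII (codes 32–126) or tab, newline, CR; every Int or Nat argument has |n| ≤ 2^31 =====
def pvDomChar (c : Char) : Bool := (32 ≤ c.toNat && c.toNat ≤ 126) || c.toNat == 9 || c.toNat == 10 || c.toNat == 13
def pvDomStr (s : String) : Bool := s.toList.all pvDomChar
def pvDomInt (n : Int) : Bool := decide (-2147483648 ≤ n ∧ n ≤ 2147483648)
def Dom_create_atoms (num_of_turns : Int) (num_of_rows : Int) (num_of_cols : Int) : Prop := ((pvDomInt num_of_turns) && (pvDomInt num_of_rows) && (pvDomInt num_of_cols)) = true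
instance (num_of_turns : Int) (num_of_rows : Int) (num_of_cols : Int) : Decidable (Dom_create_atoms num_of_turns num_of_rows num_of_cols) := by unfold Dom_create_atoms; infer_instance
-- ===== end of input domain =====

-- B replaces A's fused triple loop by a build-table-then-rescan decomposition (same cost; objective: alternative).

-- ===== PORT A =====
-- int(str(s) + str(row) + str(col) + str(turn)); all arguments are ≥ 0 here, so the
-- concatenation is a pure digit string and ofStr? never returns none (getD 0 is never taken).
def pvCat (s row col turn : Int) : Int :=
  (PySem.Int.ofStr? (PySem.Int.toStr s ++ PySem.Int.toStr row ++ PySem.Int.toStr col ++ PySem.Int.toStr turn)).getD 0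

def create_atoms (num_of_turns : Int) (num_of_rows : Int) (num_of_cols : Int) : List (List Int) :=
  let st := (PySem.List.pyRange 0 num_of_turns 1).foldl (fun st turn =>
    (PySem.List.pyRange 0 num_of_rows 1).foldl (fun st row =>
      (PySem.List.pyRange 0 num_of_cols 1).foldl (fun st col =>
        let healthy := pvCat 1 row col turn
        let sick := pvCat 2 row col turn
        let unpopulated := pvCat 3 row col turn
        let quarantined := pvCat 4 row col turn
        let vaccinated := pvCat 5 row col turn
        let at_least_one := [healthy, sick, unpopulated, quarantined, vaccinated]
        let atoms_list := st.1 ++ [at_least_one]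
        -- at_least_one[i] with 0 ≤ i < len, always in range: getD 0 never taken
        let at_most_one := (PySem.List.enumerate at_least_one 0).foldl (fun amo p =>
          (PySem.List.pyRange (p.1 + 1) (at_least_one.length : Int) 1).foldl (fun amo i =>
            amo ++ [[-p.2, -((PySem.List.pyGet? at_least_one i).getD 0)]]) amo) st.2
        (atoms_list, at_most_one)) st) st) (([], []) : List (List Int) × List (List Int))
  st.1 ++ st.2

-- ===== PORT B =====
def pvPairs : List Int → List (List Int)
  | [] => []
  | x :: xs => xs.map (fun y => [-x, -y]) ++ pvPairs xs

def create_atoms_alt (num_of_turns : Int) (num_of_rows : Int) (num_of_cols : Int) : List (List Int) :=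
  let atoms_list := (PySem.List.pyRange 0 num_of_turns 1).foldl (fun al turn =>
    (PySem.List.pyRange 0 num_of_rows 1).foldl (fun al row =>
      (PySem.List.pyRange 0 num_of_cols 1).foldl (fun al col =>
        al ++ [(PySem.List.pyRange 1 6 1).map (fun s => pvCat s row col turn)]) al) al) []
  let at_most_one := atoms_list.foldl (fun amo g => amo ++ pvPairs g) []
  atoms_list ++ at_most_one

-- ===== PRECONDITION & SPEC =====
def Spec_create_atoms (num_of_turns : Int) (num_of_rows : Int) (num_of_cols : Int) (out : List (List Int)) : Prop := out = create_atoms_alt num_of_turns num_of_rows num_of_cols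
instance (num_of_turns : Int) (num_of_rows : Int) (num_of_cols : Int) (out : List (List Int)) : Decidable (Spec_create_atoms num_of_turns num_of_rows num_of_cols out) := by unfold Spec_create_atoms; infer_instance

-- ===== CLAIM (what is proved, stated in full; the proofs are below) =====
def Claim_equal_create_atoms : Prop := ∀ (num_of_turns : Int) (num_of_rows : Int) (num_of_cols : Int), Dom_create_atoms num_of_turns num_of_rows num_of_cols → Spec_create_atoms num_of_turns num_of_rows num_of_cols (create_atoms num_of_turns num_of_rows num_of_cols)

-- ===== LEMMAS AND PROOFS =====

-- the group a cell produces (in both ports)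
def pvG (row col turn : Int) : List Int :=
  [pvCat 1 row col turn, pvCat 2 row col turn, pvCat 3 row col turn, pvCat 4 row col turn, pvCat 5 row col turn]

theorem pvG_eq_map (row col turn : Int) :
    (PySem.List.pyRange 1 6 1).map (fun s => pvCat s row col turn) = pvG row col turn := by
  simp [PySem.List.pyRange_one, List.range_succ, pvG]

-- A's inner enumerate/index loop on a cell group equals appending pvPairs of that group
theorem inner5 (row col turn : Int) (amo : List (List Int)) :
    (PySem.List.enumerate [pvCat 1 row col turn, pvCat 2 row col turn, pvCat 3 row col turn, pvCat 4 row col turn, pvCat 5 row col turn] 0).foldl (fun amo p =>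
      (PySem.List.pyRange (p.1 + 1) (([pvCat 1 row col turn, pvCat 2 row col turn, pvCat 3 row col turn, pvCat 4 row col turn, pvCat 5 row col turn] : List Int).length : Int) 1).foldl (fun amo i =>
        amo ++ [[-p.2, -((PySem.List.pyGet? [pvCat 1 row col turn, pvCat 2 row col turn, pvCat 3 row col turn, pvCat 4 row col turn, pvCat 5 row col turn] i).getD 0)]]) amo) amo
    = amo ++ pvPairs (pvG row col turn) := by
  simp [PySem.List.enumerate, PySem.List.pyRange_one, List.range_succ,
        PySem.List.pyGet?, PySem.List.pyIdx?, pvPairs, pvG]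

theorem cols_level (turn row : Int) (L : List Int) (al amo : List (List Int)) :
    L.foldl (fun st col =>
        (st.1 ++ [[pvCat 1 row col turn, pvCat 2 row col turn, pvCat 3 row col turn, pvCat 4 row col turn, pvCat 5 row col turn]],
         (PySem.List.enumerate [pvCat 1 row col turn, pvCat 2 row col turn, pvCat 3 row col turn, pvCat 4 row col turn, pvCat 5 row col turn] 0).foldl (fun amo p =>
           (PySem.List.pyRange (p.1 + 1) (([pvCat 1 row col turn, pvCat 2 row col turn, pvCat 3 row col turn, pvCat 4 row col turn, pvCat 5 row col turn] : List Int).length : Int) 1).foldl (fun amo i =>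
             amo ++ [[-p.2, -((PySem.List.pyGet? [pvCat 1 row col turn, pvCat 2 row col turn, pvCat 3 row col turn, pvCat 4 row col turn, pvCat 5 row col turn] i).getD 0)]]) amo) st.2))
      (al, amo)
    = (al ++ L.map (fun col => pvG row col turn),
       amo ++ (L.map (fun col => pvG row col turn)).flatMap pvPairs) := by
  induction L generalizing al amo with
  | nil => simp
  | cons x xs ih =>
      rw [List.foldl_cons]
      show List.foldl _ (al ++ [pvG row x turn], _) xs = _
      rw [inner5, ih]
      simp [pvG]
  
theorem rows_level (turn nc : Int) (L : List Int) (al amo : List (List Int)) :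
    L.foldl (fun st row =>
        (PySem.List.pyRange 0 nc 1).foldl (fun st col =>
          (st.1 ++ [[pvCat 1 row col turn, pvCat 2 row col turn, pvCat 3 row col turn, pvCat 4 row col turn, pvCat 5 row col turn]],
           (PySem.List.enumerate [pvCat 1 row col turn, pvCat 2 row col turn, pvCat 3 row col turn, pvCat 4 row col turn, pvCat 5 row col turn] 0).foldl (fun amo p =>
             (PySem.List.pyRange (p.1 + 1) (([pvCat 1 row col turn, pvCat 2 row col turn, pvCat 3 row col turn, pvCat 4 row col turn, pvCat 5 row col turn] : List Int).length : Int) 1).foldl (fun amo i =>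
               amo ++ [[-p.2, -((PySem.List.pyGet? [pvCat 1 row col turn, pvCat 2 row col turn, pvCat 3 row col turn, pvCat 4 row col turn, pvCat 5 row col turn] i).getD 0)]]) amo) st.2)) st)
      (al, amo)
    = (al ++ L.flatMap (fun row => (PySem.List.pyRange 0 nc 1).map (fun col => pvG row col turn)),
       amo ++ (L.flatMap (fun row => (PySem.List.pyRange 0 nc 1).map (fun col => pvG row col turn))).flatMap pvPairs) := by
  induction L generalizing al amo with
  | nil => simp
  | cons x xs ih =>
      rw [List.foldl_cons, cols_level, ih]
      simp

theorem turns_level (nr nc : Int) (L : List Int) (al amo : List (List Int)) :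
    L.foldl (fun st turn =>
        (PySem.List.pyRange 0 nr 1).foldl (fun st row =>
          (PySem.List.pyRange 0 nc 1).foldl (fun st col =>
            (st.1 ++ [[pvCat 1 row col turn, pvCat 2 row col turn, pvCat 3 row col turn, pvCat 4 row col turn, pvCat 5 row col turn]],
             (PySem.List.enumerate [pvCat 1 row col turn, pvCat 2 row col turn, pvCat 3 row col turn, pvCat 4 row col turn, pvCat 5 row col turn] 0).foldl (fun amo p =>
               (PySem.List.pyRange (p.1 + 1) (([pvCat 1 row col turn, pvCat 2 row col turn, pvCat 3 row col turn, pvCat 4 row col turn, pvCat 5 row col turn] : List Int).length : Int) 1).foldl (fun amo i =>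
                 amo ++ [[-p.2, -((PySem.List.pyGet? [pvCat 1 row col turn, pvCat 2 row col turn, pvCat 3 row col turn, pvCat 4 row col turn, pvCat 5 row col turn] i).getD 0)]]) amo) st.2)) st) st)
      (al, amo)
    = (al ++ L.flatMap (fun turn => (PySem.List.pyRange 0 nr 1).flatMap (fun row => (PySem.List.pyRange 0 nc 1).map (fun col => pvG row col turn))),
       amo ++ (L.flatMap (fun turn => (PySem.List.pyRange 0 nr 1).flatMap (fun row => (PySem.List.pyRange 0 nc 1).map (fun col => pvG row col turn)))).flatMap pvPairs) := by
  induction L generalizing al amo with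
  | nil => simp
  | cons x xs ih =>
      rw [List.foldl_cons, rows_level, ih]
      simp

-- B's first pass, level by level
theorem alt_cols (turn row : Int) (L : List Int) (al : List (List Int)) :
    L.foldl (fun al col => al ++ [(PySem.List.pyRange 1 6 1).map (fun s => pvCat s row col turn)]) al
    = al ++ L.map (fun col => pvG row col turn) := by
  rw [PySem.List.foldl_append_singleton_eq_map]
  simp [pvG_eq_map]

theorem alt_rows (turn nc : Int) (L : List Int) (al : List (List Int)) :
    L.foldl (fun al row =>
      (PySem.List.pyRange 0 nc 1).foldl (fun al col =>
        al ++ [(PySem.List.pyRange 1 6 1).map (fun s => pvCat s row col turn)]) al) al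
    = al ++ L.flatMap (fun row => (PySem.List.pyRange 0 nc 1).map (fun col => pvG row col turn)) := by
  induction L generalizing al with
  | nil => simp
  | cons x xs ih => rw [List.foldl_cons, alt_cols, ih]; simp

theorem alt_turns (nr nc : Int) (L : List Int) (al : List (List Int)) :
    L.foldl (fun al turn =>
      (PySem.List.pyRange 0 nr 1).foldl (fun al row =>
        (PySem.List.pyRange 0 nc 1).foldl (fun al col =>
          al ++ [(PySem.List.pyRange 1 6 1).map (fun s => pvCat s row col turn)]) al) al) al
    = al ++ L.flatMap (fun turn => (PySem.List.pyRange 0 nr 1).flatMap (fun row => (PySem.List.pyRange 0 nc 1).map (fun col => pvG row col turn))) := by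
  induction L generalizing al with
  | nil => simp
  | cons x xs ih => rw [List.foldl_cons, alt_rows, ih]; simp

theorem flat_pairs (G : List (List Int)) (amo : List (List Int)) :
    G.foldl (fun amo g => amo ++ pvPairs g) amo = amo ++ G.flatMap pvPairs := by
  induction G generalizing amo with
  | nil => simp
  | cons g gs ih => rw [List.foldl_cons, ih]; simp

-- ===== VERDICT (by name: the statement is the Claim_ definition above) =====
theorem create_atoms_spec : Claim_equal_create_atoms := by
  intro nt nr nc _
  show create_atoms nt nr nc = create_atoms_alt nt nr nc
  simp only [create_atoms, create_atoms_alt]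
  rw [turns_level, alt_turns, flat_pairs]
  simp
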